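-- pv_equiv track=rewrite | github.com/eternitycrushz-sudo/yyyyc | backend/routes/ai_assistant.py | find_previous_message
-- ===== SOURCE A (Python) =====
-- def find_previous_message(history, role=None, skip_current_user=False):
--     skipped_current_user = False
--     for message in reversed(history or []):
--         current_role = message.get('role')
--         content = (message.get('content') or '').strip()
--         if not content:
--             continue
--         if skip_current_user and not skipped_current_user and current_role == 'user':
--             skipped_current_user = True
--             continue
--         if role and current_role != role:
--             continue
--         return message
--     return None
-- ===== SOURCE B (Python) =====
-- def find_previous_message(history, role=None, skip_current_user=False):
--     # filter: non-empty messages, newest first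
--     msgs = [m for m in reversed(history or []) if (m.get('content') or '').strip()]
--     if skip_current_user:
--         # one-shot removal of the most recent non-empty user message
--         for i, m in enumerate(msgs):
--             if m.get('role') == 'user':
--                 del msgs[i]
--                 break
--     for m in msgs:
--         if not role or m.get('role') == role:
--             return m
--     return None
-- ===== Notes on version B (the rewrite author's own statement) =====
-- stated objective: alternative
-- what changed: Replaced the single stateful reverse scan (with a skipped-user flag and continue-chains) by three stateless passes: a reversed filter comprehension keeping non-empty messages, a one-shot deletion of the first user message, and a plain first-match search by role.
import Mathlib
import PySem

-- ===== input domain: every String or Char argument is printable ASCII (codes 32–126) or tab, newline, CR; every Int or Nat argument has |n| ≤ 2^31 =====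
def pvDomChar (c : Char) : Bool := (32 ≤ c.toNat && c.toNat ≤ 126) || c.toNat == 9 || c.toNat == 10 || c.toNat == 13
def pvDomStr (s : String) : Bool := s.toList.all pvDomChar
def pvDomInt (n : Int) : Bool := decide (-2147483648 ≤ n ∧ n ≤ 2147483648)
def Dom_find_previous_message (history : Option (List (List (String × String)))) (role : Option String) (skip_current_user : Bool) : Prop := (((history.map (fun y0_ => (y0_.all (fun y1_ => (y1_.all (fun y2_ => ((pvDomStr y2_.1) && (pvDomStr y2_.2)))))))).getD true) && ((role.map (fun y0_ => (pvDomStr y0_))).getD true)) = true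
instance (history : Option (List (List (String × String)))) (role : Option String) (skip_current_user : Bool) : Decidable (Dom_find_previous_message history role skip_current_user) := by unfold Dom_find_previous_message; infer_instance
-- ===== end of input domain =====

-- B replaces A's single stateful reverse scan by three stateless passes (filter non-empty,
-- delete the first user message once, search first role match); same O(n) cost ("alternative").

-- dict.get(k) on a message (association list, first match)
def msgGet (m : List (String × String)) (k : String) : Option String :=
  (m.find? (fun p => p.1 == k)).map (·.2)

-- ===== PORT A =====
-- the loop body of A over reversed(history or []), carrying the skipped_current_user flag
def fpmGoA (role : Option String) (skip_current_user : Bool) :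
    List (List (String × String)) → Bool → Option (List (String × String))
  | [], _ => none
  | message :: rest, skipped =>
    let current_role := msgGet message "role"
    let content := PySem.Str.strip ((msgGet message "content").getD "")
    if content = "" then fpmGoA role skip_current_user rest skipped
    else if skip_current_user && !skipped && current_role == some "user" then
      fpmGoA role skip_current_user rest true
    else
      match role with
      | some r => if r ≠ "" && current_role != some r then fpmGoA role skip_current_user rest skipped
                  else some message
      | none => some message

def find_previous_message (history : Option (List (List (String × String)))) (role : Option String) (skip_current_user : Bool) : Option (List (String × String)) :=
  fpmGoA role skip_current_user (history.getD []).reverse false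

-- ===== PORT B =====
-- [m for m in reversed(history or []) if (m.get('content') or '').strip()]
def fpmNonEmpty (m : List (String × String)) : Bool :=
  PySem.Str.strip ((msgGet m "content").getD "") ≠ ""

-- one-shot deletion of the first element whose role is 'user'
def fpmDropFirstUser : List (List (String × String)) → List (List (String × String))
  | [] => []
  | m :: rest => if msgGet m "role" == some "user" then rest else m :: fpmDropFirstUser rest

-- first message with (not role or m.get('role') == role)
def fpmFindRole (role : Option String) : List (List (String × String)) → Option (List (String × String))
  | [] => none
  | m :: rest =>
    if (match role with | none => true | some r => r == "" || msgGet m "role" == some r) then some m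
    else fpmFindRole role rest

def find_previous_message_alt (history : Option (List (List (String × String)))) (role : Option String) (skip_current_user : Bool) : Option (List (String × String)) :=
  let msgs := ((history.getD []).reverse).filter fpmNonEmpty
  let msgs := if skip_current_user then fpmDropFirstUser msgs else msgs
  fpmFindRole role msgs

-- ===== PRECONDITION & SPEC =====
def Spec_find_previous_message (history : Option (List (List (String × String)))) (role : Option String) (skip_current_user : Bool) (out : Option (List (String × String))) : Prop := out = find_previous_message_alt history role skip_current_user
instance (history : Option (List (List (String × String)))) (role : Option String) (skip_current_user : Bool) (out : Option (List (String × String))) : Decidable (Spec_find_previous_message history role skip_current_user out) := by unfold Spec_find_previous_message; infer_instance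

-- ===== CLAIM (what is proved, stated in full; the proofs are below) =====
def Claim_equal_find_previous_message : Prop := ∀ (history : Option (List (List (String × String)))) (role : Option String) (skip_current_user : Bool), Dom_find_previous_message history role skip_current_user → Spec_find_previous_message history role skip_current_user (find_previous_message history role skip_current_user)

-- ===== LEMMAS AND PROOFS =====

-- A's scan equals B's pipeline, for any remaining list and flag state
theorem fpmGoA_eq (role : Option String) (sc : Bool) :
    ∀ (l : List (List (String × String))) (skipped : Bool),
      fpmGoA role sc l skipped =
        fpmFindRole role (if sc && !skipped then fpmDropFirstUser (l.filter fpmNonEmpty)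
                          else l.filter fpmNonEmpty) := by
  intro l
  induction l with
  | nil => intro skipped; cases sc <;> cases skipped <;> simp [fpmGoA, fpmFindRole, fpmDropFirstUser]
  | cons m rest ih =>
    intro skipped
    by_cases hne : fpmNonEmpty m
    · -- content non-empty
      by_cases hu : (sc && !skipped) && (msgGet m "role" == some "user")
      · -- the one-shot user skip fires
        have h1 : sc = true := by
          cases sc <;> simp_all
        have h2 : skipped = false := by cases skipped <;> simp_all
        have h3 : (msgGet m "role" == some "user") = true := by simp_all
        subst h1 h2
        simp only [fpmGoA]
        rw [if_neg (by simpa [fpmNonEmpty] using hne)]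
        simp only [h3, Bool.not_false, Bool.and_true, if_true]
        rw [ih true]
        simp [hne, fpmDropFirstUser, h3]
      · -- no user skip: A either returns m or filters it by role; B's head of the filtered list is m
        simp only [fpmGoA]
        rw [if_neg (by simpa [fpmNonEmpty] using hne)]
        have hskip : (sc && !skipped && (msgGet m "role" == some "user")) = false := by
          simpa using hu
        rw [hskip]
        simp only [Bool.false_eq_true, if_false]
        have hfilter : (m :: rest).filter fpmNonEmpty = m :: rest.filter fpmNonEmpty := by
          simp [hne]
        by_cases hsc : (sc && !skipped) = true
        · -- drop-first-user is live but m is not user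
          have hmu : (msgGet m "role" == some "user") = false := by
            cases h : (msgGet m "role" == some "user") <;> simp_all
          rw [if_pos hsc, hfilter]
          simp only [fpmDropFirstUser, hmu, Bool.false_eq_true, if_false]
          cases role with
          | none => simp [fpmFindRole]
          | some r =>
            by_cases hr : r = ""
            · subst hr; simp [fpmFindRole]
            · by_cases hm : msgGet m "role" == some r
              · simp [fpmFindRole, hm, hr]
                intro h; simp_all
              · rw [ih skipped, if_pos hsc]
                simp [fpmFindRole, hr, hm, bne]
        · rw [if_neg hsc, hfilter]
          cases role with
          | none => simp [fpmFindRole]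
          | some r =>
            by_cases hr : r = ""
            · subst hr; simp [fpmFindRole]
            · by_cases hm : msgGet m "role" == some r
              · simp [fpmFindRole, hm, hr]
                intro h; simp_all
              · rw [ih skipped, if_neg hsc]
                simp [fpmFindRole, hr, hm, bne]
    · -- empty content: both sides skip m
      simp only [fpmGoA]
      rw [if_pos (by simpa [fpmNonEmpty] using hne), ih skipped]
      simp [hne]

-- ===== VERDICT (by name: the statement is the Claim_ definition above) =====
theorem find_previous_message_spec : Claim_equal_find_previous_message := by
  intro history role sc _
  unfold Spec_find_previous_message find_previous_message find_previous_message_alt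
  rw [fpmGoA_eq]
  cases sc <;> rfl
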